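-- pv_equiv track=rewrite | github.com/aditi14726/DSA_Python | 4214-count-dominant-indices/count-dominant-indices.py | dominantIndices
-- ===== SOURCE A (Python) =====
-- from typing import List
--
-- def dominantIndices(nums: List[int]) -> int:
--     right_sum = 0
--     right_count = 0
--     result = 0
--
--     # traverse from right to left
--     for num in reversed(nums):
--         if right_count > 0 and num * right_count > right_sum:
--             result += 1
--
--         right_sum += num
--         right_count += 1
--
--     return result
-- ===== SOURCE B (Python) =====
-- from typing import List
--
-- def dominantIndices(nums: List[int]) -> int:
--     # Pass 1: materialise, for each index, the (sum, count) of the elements to its right.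
--     stats = []
--     s = c = 0
--     for x in reversed(nums):
--         stats.append((s, c))
--         s += x
--         c += 1
--     stats.reverse()
--     # Pass 2: count the indices whose element beats the average of the right part.
--     return sum(1 for x, (s, c) in zip(nums, stats) if c > 0 and x * c > s)
-- ===== Notes on version B (the rewrite author's own statement) =====
-- stated objective: alternative
-- what changed: Replaces A's fused single right-to-left pass (counting while accumulating) with a staged materialise-then-count decomposition: a first pass builds an explicit list of per-index right-hand (sum, count) statistics, and a second counting comprehension over nums zipped with that list produces the result.
import Mathlib
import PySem

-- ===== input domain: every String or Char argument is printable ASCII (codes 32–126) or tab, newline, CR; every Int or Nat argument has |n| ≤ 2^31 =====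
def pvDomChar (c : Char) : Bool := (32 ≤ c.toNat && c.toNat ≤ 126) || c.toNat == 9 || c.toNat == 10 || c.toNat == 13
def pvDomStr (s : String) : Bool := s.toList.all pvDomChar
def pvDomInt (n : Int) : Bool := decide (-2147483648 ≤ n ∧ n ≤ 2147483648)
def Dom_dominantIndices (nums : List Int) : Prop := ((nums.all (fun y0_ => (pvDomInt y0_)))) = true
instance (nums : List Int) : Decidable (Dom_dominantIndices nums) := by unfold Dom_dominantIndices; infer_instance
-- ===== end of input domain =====

-- ===== PORT A =====
-- header: B stages the computation — first materialise per-index right-hand (sum, count) stats, then count — instead of A's fused right-to-left pass (alternative decomposition; return values proved equal).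
-- A: loop `for num in reversed(nums)` with state (right_sum, right_count, result)
def loopA : List Int → Int → Int → Int → Int
  | [], _, _, res => res
  | num :: t, rs, rc, res =>
      loopA t (rs + num) (rc + 1) (res + if rc > 0 ∧ num * rc > rs then 1 else 0)

def dominantIndices (nums : List Int) : Int := loopA nums.reverse 0 0 0

-- ===== PORT B =====
-- B pass 1: the loop over reversed(nums) appending (s, c) pairs, in append order
def buildStats : List Int → Int → Int → List (Int × Int)
  | [], _, _ => []
  | x :: t, s, c => (s, c) :: buildStats t (s + x) (c + 1)

-- B pass 2: the counting comprehension over zip(nums, stats)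
def dominantIndices_alt (nums : List Int) : Int :=
  let stats := (buildStats nums.reverse 0 0).reverse
  (((nums.zip stats).countP (fun p => decide (p.2.2 > 0 ∧ p.1 * p.2.2 > p.2.1)) : Nat) : Int)

-- ===== PRECONDITION & SPEC =====
def Spec_dominantIndices (nums : List Int) (out : Int) : Prop := out = dominantIndices_alt nums
instance (nums : List Int) (out : Int) : Decidable (Spec_dominantIndices nums out) := by unfold Spec_dominantIndices; infer_instance

-- ===== CLAIM (what is proved, stated in full; the proofs are below) =====
def Claim_equal_dominantIndices : Prop := ∀ (nums : List Int), Dom_dominantIndices nums → Spec_dominantIndices nums (dominantIndices nums)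

-- ===== LEMMAS AND PROOFS =====

theorem loopA_append (l1 l2 : List Int) (rs rc res : Int) :
    loopA (l1 ++ l2) rs rc res = loopA l2 (rs + l1.sum) (rc + l1.length) (loopA l1 rs rc res) := by
  induction l1 generalizing rs rc res with
  | nil => simp [loopA]
  | cons x t ih =>
      simp only [List.cons_append, loopA, ih, List.sum_cons, List.length_cons]
      congr 1
      · ring
      · push_cast; ring

theorem buildStats_append (l1 l2 : List Int) (s c : Int) :
    buildStats (l1 ++ l2) s c
      = buildStats l1 s c ++ buildStats l2 (s + l1.sum) (c + l1.length) := by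
  induction l1 generalizing s c with
  | nil => simp [buildStats]
  | cons x t ih =>
      simp only [List.cons_append, buildStats, ih, List.sum_cons, List.length_cons]
      congr 3
      · ring
      · push_cast; ring

theorem hB_step (x : Int) (xs : List Int) :
    dominantIndices_alt (x :: xs)
      = (if (xs.length : Int) > 0 ∧ x * (xs.length : Int) > xs.sum then 1 else 0)
          + dominantIndices_alt xs := by
  simp only [dominantIndices_alt, List.reverse_cons, buildStats_append]
  simp only [buildStats, List.sum_reverse, List.length_reverse, List.reverse_append,
    List.reverse_cons, List.reverse_nil, List.nil_append, List.cons_append,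
    List.zip_cons_cons, List.countP_cons]
  push_cast
  by_cases h : (xs.length : Int) > 0 ∧ x * (xs.length : Int) > xs.sum <;>
    simp [h, zero_add] <;> ring

theorem hA_step (x : Int) (xs : List Int) :
    dominantIndices (x :: xs)
      = dominantIndices xs
          + (if (xs.length : Int) > 0 ∧ x * (xs.length : Int) > xs.sum then 1 else 0) := by
  simp only [dominantIndices, List.reverse_cons]
  rw [loopA_append]
  simp [loopA, List.sum_reverse, List.length_reverse]

theorem dominant_eq (nums : List Int) : dominantIndices nums = dominantIndices_alt nums := by
  induction nums with
  | nil => rfl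
  | cons x xs ih => rw [hA_step, hB_step, ih]; ring

-- ===== VERDICT (by name: the statement is the Claim_ definition above) =====
theorem dominantIndices_spec : Claim_equal_dominantIndices := by
  intro nums _
  unfold Spec_dominantIndices
  exact dominant_eq nums
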